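-- pv_equiv track=rewrite | github.com/derekdperez/portfolio-site | tools/generate_blog_posts.py | title_from_slug
-- ===== SOURCE A (Python) =====
-- SPECIAL_WORDS = {
--     "ai": "AI",
--     "asp": "ASP",
--     "net": ".NET",
--     "sql": "SQL",
--     "soap": "SOAP",
--     "api": "API",
--     "apis": "APIs",
--     "core": "Core",
--     "winforms": "WinForms",
-- }
--
-- TITLE_OVERRIDES = {
--     "building-ai-assisted-engineering-workflows-that-100x-output": "Building AI-Assisted Engineering Workflows That 100x Output",
--     "from-net-framework-to-asp-net-core-a-practical-migration-path": "From .NET Framework to ASP.NET Core, a Practical Migration Path",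
--     "how-ai-workflows-change-the-economics-of-software-delivery": "How AI Workflows Change the Economics of Software Delivery",
--     "how-better-architecture-reduces-long-term-software-cost": "How Better Architecture Reduces Long-Term Software Cost",
--     "how-to-refactor-a-monolith-into-safer-smaller-steps": "How to Refactor a Monolith into Safer, Smaller Steps",
--     "how-to-update-critical-software-with-no-service-interruptions": "How to Update Critical Software With No Service Interruptions",
--     "leaving-silverlight-behind-without-losing-business-knowledge": "Leaving Silverlight Behind Without Losing Business Knowledge",
--     "logging-and-observability-for-legacy-applications": "Logging and Observability for Legacy Applications",
--     "modern-authentication-upgrades-for-legacy-business-systems": "Modern Authentication Upgrades for Legacy Business Systems",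
--     "modernizing-front-ends-built-on-outdated-frameworks": "Modernizing Front Ends Built on Outdated Frameworks",
--     "modernizing-net-framework-4-applications-without-breaking-the-business": "Modernizing .NET Framework 4 Applications Without Breaking the Business",
--     "replacing-soap-services-without-rewriting-everything": "Replacing SOAP Services Without Rewriting Everything",
--     "security-improvements-that-also-reduce-cost": "Security Improvements That Also Reduce Cost",
--     "shipping-modernization-work-in-production-safe-slices": "Shipping Modernization Work in Production-Safe Slices",
--     "sql-performance-tuning-as-a-business-lever": "SQL Performance Tuning as a Business Lever",
--     "the-case-for-incremental-change-in-critical-systems": "The Case for Incremental Change in Critical Systems",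
--     "using-ai-to-eliminate-repetitive-engineering-work": "Using AI to Eliminate Repetitive Engineering Work",
--     "what-to-do-with-aging-winforms-applications": "What to Do With Aging WinForms Applications",
--     "why-faster-systems-cost-less-to-run": "Why Faster Systems Cost Less to Run",
--     "why-senior-engineers-should-be-designing-automation-systems": "Why Senior Engineers Should Be Designing Automation Systems",
-- }
--
-- def title_from_slug(slug: str) -> str:
--     if slug in TITLE_OVERRIDES:
--         return TITLE_OVERRIDES[slug]
--     words = slug.split("-")
--     rendered: list[str] = []
--     i = 0
--     while i < len(words):
--         pair = "-".join(words[i : i + 3])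
--         if pair == "asp-net-core":
--             rendered.append("ASP.NET Core")
--             i += 3
--             continue
--         pair = "-".join(words[i : i + 2])
--         if pair == "net-framework":
--             rendered.append(".NET Framework")
--             i += 2
--             continue
--
--         word = words[i]
--         if word in SPECIAL_WORDS:
--             rendered.append(SPECIAL_WORDS[word])
--         elif word == "to":
--             rendered.append("to")
--         elif word in {"a", "an", "the", "for", "with", "of", "on", "in", "and", "or", "into", "without"} and rendered:
--             rendered.append(word)
--         else:
--             rendered.append(word.capitalize())
--         i += 1
--
--     title = " ".join(rendered)
--     title = title.replace(".NET Framework 4 Applications", ".NET Framework 4 Applications")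
--     title = title.replace(".NET Framework to ASP.NET Core", ".NET Framework to ASP.NET Core")
--     return title
-- ===== SOURCE B (Python) =====
-- SPECIAL_WORDS = {
--     "ai": "AI",
--     "asp": "ASP",
--     "net": ".NET",
--     "sql": "SQL",
--     "soap": "SOAP",
--     "api": "API",
--     "apis": "APIs",
--     "core": "Core",
--     "winforms": "WinForms",
-- }
--
-- TITLE_OVERRIDES = {
--     "building-ai-assisted-engineering-workflows-that-100x-output": "Building AI-Assisted Engineering Workflows That 100x Output",
--     "from-net-framework-to-asp-net-core-a-practical-migration-path": "From .NET Framework to ASP.NET Core, a Practical Migration Path",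
--     "how-ai-workflows-change-the-economics-of-software-delivery": "How AI Workflows Change the Economics of Software Delivery",
--     "how-better-architecture-reduces-long-term-software-cost": "How Better Architecture Reduces Long-Term Software Cost",
--     "how-to-refactor-a-monolith-into-safer-smaller-steps": "How to Refactor a Monolith into Safer, Smaller Steps",
--     "how-to-update-critical-software-with-no-service-interruptions": "How to Update Critical Software With No Service Interruptions",
--     "leaving-silverlight-behind-without-losing-business-knowledge": "Leaving Silverlight Behind Without Losing Business Knowledge",
--     "logging-and-observability-for-legacy-applications": "Logging and Observability for Legacy Applications",
--     "modern-authentication-upgrades-for-legacy-business-systems": "Modern Authentication Upgrades for Legacy Business Systems",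
--     "modernizing-front-ends-built-on-outdated-frameworks": "Modernizing Front Ends Built on Outdated Frameworks",
--     "modernizing-net-framework-4-applications-without-breaking-the-business": "Modernizing .NET Framework 4 Applications Without Breaking the Business",
--     "replacing-soap-services-without-rewriting-everything": "Replacing SOAP Services Without Rewriting Everything",
--     "security-improvements-that-also-reduce-cost": "Security Improvements That Also Reduce Cost",
--     "shipping-modernization-work-in-production-safe-slices": "Shipping Modernization Work in Production-Safe Slices",
--     "sql-performance-tuning-as-a-business-lever": "SQL Performance Tuning as a Business Lever",
--     "the-case-for-incremental-change-in-critical-systems": "The Case for Incremental Change in Critical Systems",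
--     "using-ai-to-eliminate-repetitive-engineering-work": "Using AI to Eliminate Repetitive Engineering Work",
--     "what-to-do-with-aging-winforms-applications": "What to Do With Aging WinForms Applications",
--     "why-faster-systems-cost-less-to-run": "Why Faster Systems Cost Less to Run",
--     "why-senior-engineers-should-be-designing-automation-systems": "Why Senior Engineers Should Be Designing Automation Systems",
-- }
--
-- _STOP_WORDS = ("a", "an", "the", "for", "with", "of", "on", "in", "and", "or", "into", "without")
--
--
-- def _tokens(words):
--     # phase one: greedily merge the two fixed phrases into single done-tokens
--     toks = []
--     i = 0
--     n = len(words)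
--     while i < n:
--         if words[i : i + 3] == ["asp", "net", "core"]:
--             toks.append((True, "ASP.NET Core"))
--             i += 3
--         elif words[i : i + 2] == ["net", "framework"]:
--             toks.append((True, ".NET Framework"))
--             i += 2
--         else:
--             toks.append((False, words[i]))
--             i += 1
--     return toks
--
--
-- def _render(idx, merged, w):
--     # phase two: position-aware rendering of one token
--     if merged:
--         return w
--     if w in SPECIAL_WORDS:
--         return SPECIAL_WORDS[w]
--     if w == "to":
--         return "to"
--     if idx > 0 and w in _STOP_WORDS:
--         return w
--     return w.capitalize()
--
--
-- def title_from_slug(slug: str) -> str: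
--     if slug in TITLE_OVERRIDES:
--         return TITLE_OVERRIDES[slug]
--     toks = _tokens(slug.split("-"))
--     return " ".join(_render(i, m, w) for i, (m, w) in enumerate(toks))
-- ===== Notes on version B (the rewrite author's own statement) =====
-- stated objective: simpler
-- what changed: A's single stateful loop (joined-slice string tests, a render branch keyed on the accumulator's nonemptiness, and two no-op replace calls) is decomposed into two phases: a tokenizer that merges the fixed phrases by list-slice comparison, then a position-indexed render over enumerate; the dead replace calls are dropped.
import Mathlib
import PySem

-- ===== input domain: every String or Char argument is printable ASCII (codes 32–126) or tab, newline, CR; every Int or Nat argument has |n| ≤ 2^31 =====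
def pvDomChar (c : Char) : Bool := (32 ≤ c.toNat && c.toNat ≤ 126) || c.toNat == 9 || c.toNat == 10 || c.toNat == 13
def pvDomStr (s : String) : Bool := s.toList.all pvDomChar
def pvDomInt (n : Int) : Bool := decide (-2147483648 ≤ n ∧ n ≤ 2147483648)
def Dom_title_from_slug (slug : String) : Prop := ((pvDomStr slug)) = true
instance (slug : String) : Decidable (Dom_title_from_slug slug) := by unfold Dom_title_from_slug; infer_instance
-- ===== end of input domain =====

-- B replaces A's single context-dependent render loop (with its joined-slice phrase tests and two
-- no-op replace calls) by a two-phase pass — tokenize merging the two fixed phrases by list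
-- comparison, then a position-indexed render over enumerate — objective: simpler.

-- module constants shared by both programs
def pvSpecialWords : PySem.Dict (List Char) (List Char) :=
  PySem.Dict.ofList
    [("ai".toList, "AI".toList), ("asp".toList, "ASP".toList), ("net".toList, ".NET".toList),
     ("sql".toList, "SQL".toList), ("soap".toList, "SOAP".toList), ("api".toList, "API".toList),
     ("apis".toList, "APIs".toList), ("core".toList, "Core".toList), ("winforms".toList, "WinForms".toList)]

def pvTitleOverrides : PySem.Dict String String :=
  PySem.Dict.ofList
    [("building-ai-assisted-engineering-workflows-that-100x-output", "Building AI-Assisted Engineering Workflows That 100x Output"),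
     ("from-net-framework-to-asp-net-core-a-practical-migration-path", "From .NET Framework to ASP.NET Core, a Practical Migration Path"),
     ("how-ai-workflows-change-the-economics-of-software-delivery", "How AI Workflows Change the Economics of Software Delivery"),
     ("how-better-architecture-reduces-long-term-software-cost", "How Better Architecture Reduces Long-Term Software Cost"),
     ("how-to-refactor-a-monolith-into-safer-smaller-steps", "How to Refactor a Monolith into Safer, Smaller Steps"),
     ("how-to-update-critical-software-with-no-service-interruptions", "How to Update Critical Software With No Service Interruptions"),
     ("leaving-silverlight-behind-without-losing-business-knowledge", "Leaving Silverlight Behind Without Losing Business Knowledge"),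
     ("logging-and-observability-for-legacy-applications", "Logging and Observability for Legacy Applications"),
     ("modern-authentication-upgrades-for-legacy-business-systems", "Modern Authentication Upgrades for Legacy Business Systems"),
     ("modernizing-front-ends-built-on-outdated-frameworks", "Modernizing Front Ends Built on Outdated Frameworks"),
     ("modernizing-net-framework-4-applications-without-breaking-the-business", "Modernizing .NET Framework 4 Applications Without Breaking the Business"),
     ("replacing-soap-services-without-rewriting-everything", "Replacing SOAP Services Without Rewriting Everything"),
     ("security-improvements-that-also-reduce-cost", "Security Improvements That Also Reduce Cost"),
     ("shipping-modernization-work-in-production-safe-slices", "Shipping Modernization Work in Production-Safe Slices"),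
     ("sql-performance-tuning-as-a-business-lever", "SQL Performance Tuning as a Business Lever"),
     ("the-case-for-incremental-change-in-critical-systems", "The Case for Incremental Change in Critical Systems"),
     ("using-ai-to-eliminate-repetitive-engineering-work", "Using AI to Eliminate Repetitive Engineering Work"),
     ("what-to-do-with-aging-winforms-applications", "What to Do With Aging WinForms Applications"),
     ("why-faster-systems-cost-less-to-run", "Why Faster Systems Cost Less to Run"),
     ("why-senior-engineers-should-be-designing-automation-systems", "Why Senior Engineers Should Be Designing Automation Systems")]

def pvStopWords : PySem.Set (List Char) :=
  PySem.Set.ofList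
    ["a".toList, "an".toList, "the".toList, "for".toList, "with".toList, "of".toList,
     "on".toList, "in".toList, "and".toList, "or".toList, "into".toList, "without".toList]

-- str.capitalize(): first char uppercased, rest lowercased (exact on the ASCII domain)
def pvCapitalize (w : List Char) : List Char :=
  match w with
  | [] => []
  | c :: rest => PySem.Chars.upperChar c :: rest.map PySem.Chars.lowerChar

-- ===== PORT A =====
-- A's while loop over index i, written as structural recursion on the remaining suffix of
-- `words` (words[i:i+3] = take 3 of the suffix); same state `rendered`, same joined-slice tests.
def pvALoop (ws : List (List Char)) (rendered : List (List Char)) : List (List Char) :=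
  match ws with
  | [] => rendered
  | w :: rest =>
    if PySem.Chars.join ['-'] ((w :: rest).take 3) = "asp-net-core".toList then
      pvALoop (rest.drop 2) (rendered ++ ["ASP.NET Core".toList])
    else if PySem.Chars.join ['-'] ((w :: rest).take 2) = "net-framework".toList then
      pvALoop (rest.drop 1) (rendered ++ [".NET Framework".toList])
    else
      pvALoop rest (rendered ++
        [match pvSpecialWords.get? w with
         | some s => s
         | none =>
           if w = "to".toList then "to".toList
           else if pvStopWords.contains w ∧ rendered ≠ [] then w
           else pvCapitalize w])
termination_by ws.length
decreasing_by all_goals simp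

def title_from_slug (slug : String) : String :=
  match pvTitleOverrides.get? slug with
  | some t => t
  | none =>
    let words := PySem.Chars.splitOn slug.toList ['-']
    let title := PySem.Chars.join [' '] (pvALoop words [])
    let title := PySem.Chars.replace title ".NET Framework 4 Applications".toList ".NET Framework 4 Applications".toList
    let title := PySem.Chars.replace title ".NET Framework to ASP.NET Core".toList ".NET Framework to ASP.NET Core".toList
    String.ofList title

-- ===== PORT B =====
-- phase one: greedily merge the two fixed phrases into single done-tokens
def pvTokens (ws : List (List Char)) : List (Bool × List Char) :=
  match ws with
  | [] => []
  | w :: rest =>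
    if (w :: rest).take 3 = ["asp".toList, "net".toList, "core".toList] then
      (true, "ASP.NET Core".toList) :: pvTokens (rest.drop 2)
    else if (w :: rest).take 2 = ["net".toList, "framework".toList] then
      (true, ".NET Framework".toList) :: pvTokens (rest.drop 1)
    else (false, w) :: pvTokens rest
termination_by ws.length
decreasing_by all_goals simp

-- phase two: position-aware rendering of one token
def pvRender (idx : Int) (merged : Bool) (w : List Char) : List Char :=
  if merged then w
  else
    match pvSpecialWords.get? w with
    | some s => s
    | none =>
      if w = "to".toList then "to".toList
      else if 0 < idx ∧ pvStopWords.contains w then w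
      else pvCapitalize w

def title_from_slug_alt (slug : String) : String :=
  match pvTitleOverrides.get? slug with
  | some t => t
  | none =>
    let toks := pvTokens (PySem.Chars.splitOn slug.toList ['-'])
    String.ofList (PySem.Chars.join [' ']
      ((PySem.List.enumerate toks).map (fun p => pvRender p.1 p.2.1 p.2.2)))

-- ===== PRECONDITION & SPEC =====
def Spec_title_from_slug (slug : String) (out : String) : Prop := out = title_from_slug_alt slug
instance (slug : String) (out : String) : Decidable (Spec_title_from_slug slug out) := by unfold Spec_title_from_slug; infer_instance

-- ===== CLAIM (what is proved, stated in full; the proofs are below) =====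
def Claim_equal_title_from_slug : Prop := ∀ (slug : String), Dom_title_from_slug slug → Spec_title_from_slug slug (title_from_slug slug)

-- ===== LEMMAS AND PROOFS =====

-- s.replace(old, old) = s
lemma pvReplaceGo_self (old : List Char) : ∀ (fuel : Nat) (l acc : List Char),
    PySem.Chars.replace.go old old fuel l acc = acc.reverse ++ l := by
  intro fuel
  induction fuel with
  | zero => intro l acc; rw [PySem.Chars.replace.go.eq_def]
  | succ fuel ih =>
    intro l acc
    rw [PySem.Chars.replace.go.eq_def]
    split
    · rfl
    · simp
    · rename_i fuel' c t heq'
      obtain rfl : fuel' = fuel := by omega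
      split
      · rename_i hp
        rw [ih]
        have h2 := List.isPrefixOf_iff_prefix.mp hp
        simp [List.prefix_iff_eq_append.mp h2]
      · rw [ih]; simp

lemma pvReplace_self (s old : List Char) : PySem.Chars.replace s old old = s := by
  unfold PySem.Chars.replace
  by_cases h : old.isEmpty
  · have : old = [] := List.isEmpty_iff.mp h
    subst this
    simp
  · simp [h, pvReplaceGo_self]

-- every piece of slug.split("-") is dash-free
lemma pvSplitGo_nodash : ∀ (fuel : Nat) (l cur : List Char) (acc : List (List Char)),
    l.length < fuel → (∀ p ∈ acc, '-' ∉ p) → '-' ∉ cur →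
    ∀ p ∈ PySem.Chars.splitOn.go ['-'] fuel l cur acc, '-' ∉ p := by
  intro fuel
  induction fuel with
  | zero => intro l cur acc hl; omega
  | succ fuel ih =>
    intro l cur acc hl hacc hcur
    rw [PySem.Chars.splitOn.go.eq_def]
    split
    · omega
    · intro p hp
      simp at hp
      rcases hp with h | h
      · exact hacc p h
      · subst h; simp [hcur]
    · rename_i fuel' c rest heq'
      obtain rfl : fuel' = fuel := by omega
      rename_i cur2 acc2 u1 u2 u3 u4
      simp only [List.length_cons] at hl
      by_cases hp : List.isPrefixOf ['-'] (c :: rest) = true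
      · rw [if_pos hp]
        refine ih rest [] ((cur2.reverse) :: acc2) (by omega) ?_ (by simp)
        intro p hmem
        rcases List.mem_cons.mp hmem with h | h
        · subst h; simp [hcur]
        · exact hacc p h
      · rw [if_neg hp]
        have hc : c ≠ '-' := by
          intro h; subst h
          simp [List.isPrefixOf] at hp
        refine ih rest (c :: cur2) acc2 (by omega) hacc ?_
        intro h
        rcases List.mem_cons.mp h with h | h
        · exact hc h.symm
        · exact hcur h

lemma pvWords_nodash (cs : List Char) : ∀ p ∈ PySem.Chars.splitOn cs ['-'], '-' ∉ p := by
  unfold PySem.Chars.splitOn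
  exact pvSplitGo_nodash (cs.length + 1) cs [] [] (by omega) (by simp) (by simp)

-- unique decomposition at a dash, given dash-free halves
lemma pvSplitDash : ∀ (x u r v : List Char), '-' ∉ x → '-' ∉ u →
    x ++ '-' :: r = u ++ '-' :: v → x = u ∧ r = v := by
  intro x
  induction x with
  | nil =>
    intro u r v _ hu h
    match u with
    | [] => simpa using h
    | c :: u' =>
      exfalso
      simp at h
      exact hu (List.mem_cons.mpr (Or.inl h.1))
  | cons c x' ih =>
    intro u r v hx hu h
    match u with
    | [] =>
      exfalso
      simp at h
      exact hx (List.mem_cons.mpr (Or.inl h.1.symm))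
    | d :: u' =>
      simp at h
      obtain ⟨hcd, h2⟩ := h
      have := ih u' r v (fun hm => hx (List.mem_cons_of_mem _ hm)) (fun hm => hu (List.mem_cons_of_mem _ hm)) h2
      exact ⟨by simp [hcd, this.1], this.2⟩

lemma pvJoin3 (ws : List (List Char)) (h : ∀ w ∈ ws, '-' ∉ w) :
    PySem.Chars.join ['-'] (ws.take 3) = "asp-net-core".toList ↔
      ws.take 3 = ["asp".toList, "net".toList, "core".toList] := by
  match ws with
  | [] => simp [PySem.Chars.join, List.intercalate]
  | [a] =>
    simp [PySem.Chars.join, List.intercalate]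
    intro ha
    have hna := h a (by simp)
    rw [ha] at hna
    exact absurd (by decide) hna
  | [a, b] =>
    constructor
    · intro hj
      exfalso
      simp [PySem.Chars.join, List.intercalate] at hj
      have hcount := congrArg (List.count '-') hj
      rw [List.count_append, List.count_cons] at hcount
      rw [List.count_eq_zero.mpr (h a (by simp)), List.count_eq_zero.mpr (h b (by simp))] at hcount
      simp at hcount
    · intro hj; simp at hj
  | a :: b :: c :: t =>
    have hsplit : "asp-net-core".toList = "asp".toList ++ '-' :: ("net".toList ++ '-' :: "core".toList) := by decide
    constructor
    · intro hj
      simp only [List.take, PySem.Chars.join, List.intercalate] at hj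
      have hj' : a ++ '-' :: (b ++ '-' :: c) = "asp".toList ++ '-' :: ("net".toList ++ '-' :: "core".toList) := by
        rw [← hsplit, ← hj]; simp
      obtain ⟨ha, hbc⟩ := pvSplitDash a "asp".toList (b ++ '-' :: c) ("net".toList ++ '-' :: "core".toList)
        (h a (by simp)) (by decide) hj'
      obtain ⟨hb, hc⟩ := pvSplitDash b "net".toList c "core".toList
        (h b (by simp)) (by decide) hbc
      simp [ha, hb, hc]
    · intro hj
      simp at hj
      obtain ⟨ha, hb, hc⟩ := hj
      subst ha; subst hb; subst hc
      simp only [List.take_succ_cons, List.take_zero]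
      decide

lemma pvJoin2 (ws : List (List Char)) (h : ∀ w ∈ ws, '-' ∉ w) :
    PySem.Chars.join ['-'] (ws.take 2) = "net-framework".toList ↔
      ws.take 2 = ["net".toList, "framework".toList] := by
  match ws with
  | [] => simp [PySem.Chars.join, List.intercalate]
  | [a] =>
    simp [PySem.Chars.join, List.intercalate]
    intro ha
    have hna := h a (by simp)
    rw [ha] at hna
    exact absurd (by decide) hna
  | a :: b :: t =>
    have hsplit : "net-framework".toList = "net".toList ++ '-' :: "framework".toList := by decide
    constructor
    · intro hj
      simp only [List.take, PySem.Chars.join, List.intercalate] at hj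
      have hj' : a ++ '-' :: b = "net".toList ++ '-' :: "framework".toList := by
        rw [← hsplit, ← hj]; simp
      obtain ⟨ha, hb⟩ := pvSplitDash a "net".toList b "framework".toList
        (h a (by simp)) (by decide) hj'
      simp [ha, hb]
    · intro hj
      simp at hj
      obtain ⟨ha, hb⟩ := hj
      subst ha; subst hb
      simp only [List.take_succ_cons, List.take_zero]
      decide

-- main loop correspondence: A's accumulator loop = B's tokenize-then-render, with the
-- accumulator length as B's enumeration start
lemma pvMain : ∀ ws : List (List Char), (∀ w ∈ ws, '-' ∉ w) → ∀ acc : List (List Char),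
    pvALoop ws acc = acc ++
      (PySem.List.enumerate (pvTokens ws) (acc.length : Int)).map (fun p => pvRender p.1 p.2.1 p.2.2) := by
  intro ws
  induction ws using pvTokens.induct with
  | case1 =>
    intro _ acc
    simp [pvALoop, pvTokens, PySem.List.enumerate_nil]
  | case2 w rest h3 ih =>
    intro h acc
    have hrest : ∀ x ∈ rest.drop 2, '-' ∉ x :=
      fun x hx => h x (List.mem_cons_of_mem _ (List.mem_of_mem_drop hx))
    rw [pvALoop, pvTokens]
    rw [if_pos ((pvJoin3 (w :: rest) h).mpr h3), if_pos h3]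
    rw [PySem.List.enumerate_cons, List.map_cons]
    rw [ih hrest (acc ++ ["ASP.NET Core".toList])]
    simp [pvRender]
  | case3 w rest h3 h2 ih =>
    intro h acc
    have hrest : ∀ x ∈ rest.drop 1, '-' ∉ x :=
      fun x hx => h x (List.mem_cons_of_mem _ (List.mem_of_mem_drop hx))
    rw [pvALoop, pvTokens]
    rw [if_neg (fun hc => h3 ((pvJoin3 (w :: rest) h).mp hc)),
        if_pos ((pvJoin2 (w :: rest) h).mpr h2),
        if_neg h3, if_pos h2]
    rw [PySem.List.enumerate_cons, List.map_cons]
    rw [ih hrest (acc ++ [".NET Framework".toList])]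
    simp [pvRender]
  | case4 w rest h3 h2 ih =>
    intro h acc
    have hrest : ∀ x ∈ rest, '-' ∉ x := fun x hx => h x (List.mem_cons_of_mem _ hx)
    rw [pvALoop, pvTokens]
    rw [if_neg (fun hc => h3 ((pvJoin3 (w :: rest) h).mp hc)),
        if_neg (fun hc => h2 ((pvJoin2 (w :: rest) h).mp hc)),
        if_neg h3, if_neg h2]
    rw [PySem.List.enumerate_cons, List.map_cons]
    have hren : (match pvSpecialWords.get? w with
         | some s => s
         | none =>
           if w = "to".toList then "to".toList
           else if pvStopWords.contains w ∧ acc ≠ [] then w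
           else pvCapitalize w) = pvRender (acc.length : Int) false w := by
      unfold pvRender
      simp only [Bool.false_eq_true, if_false]
      cases hg : pvSpecialWords.get? w with
      | some s => rfl
      | none =>
        by_cases hto : w = "to".toList
        · simp [hto]
        · rw [if_neg hto, if_neg hto]
          have hiff : (pvStopWords.contains w ∧ acc ≠ []) ↔ (0 < (acc.length : Int) ∧ pvStopWords.contains w) := by
            constructor
            · rintro ⟨h1, h2⟩
              refine ⟨?_, h1⟩
              have := List.length_pos_iff.mpr h2
              exact_mod_cast this
            · rintro ⟨h1, h2⟩
              refine ⟨h2, ?_⟩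
              intro hnil
              subst hnil
              simp at h1
          rw [if_congr hiff rfl rfl]
    rw [hren, ih hrest (acc ++ [pvRender (acc.length : Int) false w])]
    simp

-- ===== VERDICT (by name: the statement is the Claim_ definition above) =====
theorem title_from_slug_spec : Claim_equal_title_from_slug := by
  intro slug _
  unfold Spec_title_from_slug title_from_slug title_from_slug_alt
  cases hg : pvTitleOverrides.get? slug with
  | some t => rfl
  | none =>
    simp only []
    rw [pvReplace_self, pvReplace_self]
    rw [pvMain (PySem.Chars.splitOn slug.toList ['-']) (pvWords_nodash slug.toList) []]
    simp
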